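-- pv_equiv track=rewrite | github.com/ayoubharati/dataware_chatbot | chat_backend/preperation files/shema.py | find_table_path
-- ===== SOURCE A (Python) =====
-- from collections import defaultdict, deque
--
-- def find_table_path(graph, start_table, end_table):
--     """Find the shortest path between two tables using BFS"""
--     if start_table == end_table:
--         return [start_table]
--
--     if start_table not in graph:
--         return None
--
--     queue = deque([(start_table, [start_table])])
--     visited = set([start_table])
--
--     while queue:
--         current_table, path = queue.popleft()
--
--         for connection in graph[current_table]:
--             next_table = connection["table"]
--
--             if next_table == end_table:
--                 return path + [next_table]
--
--             if next_table not in visited: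
--                 visited.add(next_table)
--                 queue.append((next_table, path + [next_table]))
--
--     return None
-- ===== SOURCE B (Python) =====
-- def find_table_path(graph, start_table, end_table):
--     """Find the shortest path between two tables: BFS over a two-list FIFO queue of
--     node names (no deque, no per-entry path copies); predecessors are recorded in a
--     parent dict (which doubles as the visited set) and the path is rebuilt once."""
--     if start_table == end_table:
--         return [start_table]
--
--     if start_table not in graph:
--         return None
--
--     parent = {}
--     front = [start_table]   # processed from the END; refilled from back (reversed)
--     back = []               # newly discovered nodes, in discovery order
--
--     while front or back:
--         if not front:
--             front = back
--             front.reverse()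
--             back = []
--         current = front.pop()
--
--         targets = [connection["table"] for connection in graph[current]]
--
--         if end_table in targets:
--             path = [end_table]
--             node = current
--             while node != start_table:
--                 path.append(node)
--                 node = parent[node]
--             path.append(start_table)
--             path.reverse()
--             return path
--
--         for t in targets:
--             if t not in parent and t != start_table:
--                 parent[t] = current
--                 back.append(t)
--
--     return None
-- ===== Notes on version B (the rewrite author's own statement) =====
-- stated objective: alternative
-- what changed: A's deque of (node, full start-to-node path copy) entries is replaced by a two-list FIFO queue of bare node names, a parent/predecessor dict that also serves as the visited set, a per-node target-list extraction with a membership test for the goal, and a single path reconstruction at the end.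
-- outside the precondition, e.g. on find_table_path({'a': [{'table': 'b'}, {}]}, 'a', 'b'): A returns ['a', 'b'], B raises KeyError
import Mathlib
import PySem

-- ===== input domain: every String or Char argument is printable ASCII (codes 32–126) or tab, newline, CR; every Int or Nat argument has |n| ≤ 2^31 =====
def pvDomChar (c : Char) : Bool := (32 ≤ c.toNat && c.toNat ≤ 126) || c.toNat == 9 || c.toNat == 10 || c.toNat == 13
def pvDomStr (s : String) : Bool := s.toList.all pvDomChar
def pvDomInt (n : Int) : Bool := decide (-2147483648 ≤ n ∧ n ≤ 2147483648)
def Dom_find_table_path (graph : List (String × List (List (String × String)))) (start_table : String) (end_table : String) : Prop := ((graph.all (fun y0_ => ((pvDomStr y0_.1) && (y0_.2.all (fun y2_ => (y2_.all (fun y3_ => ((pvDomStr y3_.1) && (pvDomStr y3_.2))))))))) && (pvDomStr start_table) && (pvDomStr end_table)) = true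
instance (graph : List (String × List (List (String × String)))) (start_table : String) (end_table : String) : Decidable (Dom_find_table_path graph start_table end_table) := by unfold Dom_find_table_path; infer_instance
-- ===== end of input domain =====

-- B replaces A's deque of (node, full path copy) entries by a two-list FIFO queue of bare
-- node names plus a parent dict (doubling as the visited set) and one path reconstruction;
-- return values agree on all of Pre_ (proved below).

-- Totality guard shared by both main loop ports: every loop iteration pops one queued node,
-- and at most 1 + (total number of connection entries) nodes are ever enqueued,
-- so this fuel is never exhausted on Python's runs.
def pvFuel (graph : List (String × List (List (String × String)))) : Nat :=
  1 + (graph.map (fun p => p.2.length)).sum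

-- ===== PORT A =====
-- inner `for connection in graph[current_table]` loop of A; returns (early-return path?, queue, visited)
-- connection["table"] raises KeyError when the key is missing — such inputs are outside Pre_;
-- ported with getD "" (exact under Pre_).
def pvScanA (end_table : String) (path : List String) :
    List (List (String × String)) → List (String × List String) → PySem.Set String →
      Option (List String) × List (String × List String) × PySem.Set String
  | [], queue, visited => (none, queue, visited)
  | conn :: conns, queue, visited =>
      let next_table := (PySem.Dict.mk conn).getD "table" ""
      if next_table = end_table then (some (path ++ [next_table]), queue, visited)
      else if PySem.Set.contains visited next_table then
        pvScanA end_table path conns queue visited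
      else
        pvScanA end_table path conns (queue ++ [(next_table, path ++ [next_table])])
          (PySem.Set.add visited next_table)

-- `while queue:` loop of A; graph[current_table] raises KeyError for a missing key — outside Pre_ (getD []).
def pvLoopA (graph : PySem.Dict String (List (List (String × String)))) (end_table : String) :
    Nat → List (String × List String) → PySem.Set String → Option (List String)
  | 0, _, _ => none
  | _ + 1, [], _ => none
  | fuel + 1, (current_table, path) :: rest, visited =>
      match pvScanA end_table path (graph.getD current_table []) rest visited with
      | (some p, _, _) => some p
      | (none, queue', visited') => pvLoopA graph end_table fuel queue' visited'

def find_table_path (graph : List (String × List (List (String × String)))) (start_table : String) (end_table : String) : Option (List String) :=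
  if start_table = end_table then some [start_table]
  else if (PySem.Dict.mk graph).contains start_table = false then none
  else pvLoopA (PySem.Dict.mk graph) end_table (pvFuel graph)
        [(start_table, [start_table])] (PySem.Set.ofList [start_table])

-- ===== PORT B =====
-- `path = [end_table]; node = current; while node != start_table: path.append(node); node = parent[node]`
-- parent[node] always exists on B's runs (chain invariant); ported with getD "" and fuel = parent.size + 1.
def pvRebuildB (parent : PySem.Dict String String) (start_table : String) :
    Nat → String → List String → List String
  | 0, _, path => path
  | fuel + 1, node, path =>
      if node = start_table then path
      else pvRebuildB parent start_table fuel (parent.getD node "") (path ++ [node])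

-- `for t in targets:` loop of B: record parent and enqueue (append to back) each fresh target
def pvAddTargets (start_table current : String) :
    List String → List String → PySem.Dict String String → List String × PySem.Dict String String
  | [], back, parent => (back, parent)
  | t :: ts, back, parent =>
      if parent.contains t = false ∧ t ≠ start_table then
        pvAddTargets start_table current ts (back ++ [t]) (parent.insert t current)
      else pvAddTargets start_table current ts back parent

-- `while front or back:` loop of B; front is popped from its END, refilled from back reversed
def pvLoopB (graph : PySem.Dict String (List (List (String × String)))) (start_table end_table : String) :
    Nat → List String → List String → PySem.Dict String String → Option (List String)
  | 0, _, _, _ => none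
  | fuel + 1, front, back, parent =>
      if front.isEmpty && back.isEmpty then none
      else
        let front' := if front.isEmpty then back.reverse else front
        let back' := if front.isEmpty then [] else back
        match front'.getLast? with
        | none => none  -- unreachable: front' is nonempty here
        | some current =>
            let targets := (graph.getD current []).map
              (fun connection => (PySem.Dict.mk connection).getD "table" "")
            if targets.contains end_table then
              some ((pvRebuildB parent start_table (parent.size + 1) current [end_table]
                      ++ [start_table]).reverse)
            else
              match pvAddTargets start_table current targets back' parent with
              | (back'', parent') => pvLoopB graph start_table end_table fuel front'.dropLast back'' parent'

def find_table_path_alt (graph : List (String × List (List (String × String)))) (start_table : String) (end_table : String) : Option (List String) :=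
  if start_table = end_table then some [start_table]
  else if (PySem.Dict.mk graph).contains start_table = false then none
  else pvLoopB (PySem.Dict.mk graph) start_table end_table (pvFuel graph)
        [start_table] [] PySem.Dict.empty

-- ===== PRECONDITION & SPEC =====
-- Pre_ excludes the inputs on which Python A raises KeyError: a dequeued table missing from
-- the graph dict, or a traversed connection dict without a "table" key.  The closed-form
-- well-formedness condition below is sufficient rather than exact, so it also excludes some
-- inputs on which A happens to return before reaching a malformed entry (see claim cites).
def Pre_find_table_path (graph : List (String × List (List (String × String)))) (start_table : String) (end_table : String) : Prop :=
  start_table = end_table ∨ (PySem.Dict.mk graph).contains start_table = false ∨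
    (∀ entry ∈ graph, ∀ conn ∈ entry.2,
      (PySem.Dict.mk conn).contains "table" = true ∧
        ((PySem.Dict.mk conn).getD "table" "" = end_table ∨
          (PySem.Dict.mk graph).contains ((PySem.Dict.mk conn).getD "table" "") = true))
instance (graph : List (String × List (List (String × String)))) (start_table : String) (end_table : String) : Decidable (Pre_find_table_path graph start_table end_table) := by unfold Pre_find_table_path; infer_instance

def pvWitness_find_table_path : (List (String × List (List (String × String)))) × String × String :=
  ([("a", [[("table", "b")]]), ("b", [])], "a", "b")

def Spec_find_table_path (graph : List (String × List (List (String × String)))) (start_table : String) (end_table : String) (out : Option (List String)) : Prop := out = find_table_path_alt graph start_table end_table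
instance (graph : List (String × List (List (String × String)))) (start_table : String) (end_table : String) (out : Option (List String)) : Decidable (Spec_find_table_path graph start_table end_table out) := by unfold Spec_find_table_path; infer_instance

-- ===== CLAIM (what is proved, stated in full; the proofs are below) =====
def Claim_equal_find_table_path : Prop := ∀ (graph : List (String × List (List (String × String)))) (start_table : String) (end_table : String), Dom_find_table_path graph start_table end_table → Pre_find_table_path graph start_table end_table → Spec_find_table_path graph start_table end_table (find_table_path graph start_table end_table)

-- ===== LEMMAS AND PROOFS =====

-- `pvChain parent s n p` : p is the start→n path recorded in the parent map.
inductive pvChain (parent : PySem.Dict String String) (start_table : String) : String → List String → Prop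
  | base : pvChain parent start_table start_table [start_table]
  | step (n prev : String) (p : List String) :
      n ≠ start_table → parent.get? n = some prev → pvChain parent start_table prev p →
      pvChain parent start_table n (p ++ [n])

lemma pvChain_head {parent : PySem.Dict String String} {s n : String} {p : List String}
    (h : pvChain parent s n p) : p.head? = some s := by
  induction h with
  | base => rfl
  | step n prev p hne hget hc ih =>
      have hp : p ≠ [] := by intro h0; rw [h0] at ih; simp at ih
      rw [List.head?_append_of_ne_nil _ hp]
      exact ih

lemma pvChain_insert_fresh {parent : PySem.Dict String String} {s n : String} {p : List String}
    {visited : PySem.Set String} (h : pvChain parent s n p) (hsub : ∀ x ∈ p, x ∈ visited)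
    {k v : String} (hk : k ∉ visited) : pvChain (parent.insert k v) s n p := by
  induction h with
  | base => exact pvChain.base
  | step n prev p hne hget hc ih =>
      refine pvChain.step n prev p hne ?_ (ih (fun x hx => hsub x (by simp [hx])))
      rw [PySem.Dict.get?_insert_of_ne]
      · exact hget
      · intro hnk; exact hk (hnk ▸ hsub n (by simp))

lemma pvRebuildB_correct {parent : PySem.Dict String String} {s n : String} {p : List String}
    (h : pvChain parent s n p) :
    ∀ fuel acc, p.length ≤ fuel → pvRebuildB parent s fuel n acc = acc ++ (p.drop 1).reverse := by
  induction h with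
  | base =>
      intro fuel acc hf
      cases fuel with
      | zero => simp at hf
      | succ f => simp [pvRebuildB]
  | step n prev p hne hget hc ih =>
      intro fuel acc hf
      cases fuel with
      | zero => simp at hf
      | succ f =>
          have hgetD : parent.getD n "" = prev := PySem.Dict.getD_of_get?_eq_some parent "" hget
          have hp : p ≠ [] := by
            intro h0
            have := pvChain_head hc
            rw [h0] at this; simp at this
          simp only [pvRebuildB, if_neg hne, hgetD]
          rw [ih f (acc ++ [n]) (by simp at hf ⊢; omega)]
          rw [List.drop_append_of_le_length (List.length_pos_iff.mpr hp)]
          simp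

-- invariant pieces relating A's state (queue of (node, path), visited) to B's (front, back, parent)
def pvRel (s : String) (visited : PySem.Set String) (parent : PySem.Dict String String)
    (a : String × List String) (n : String) : Prop :=
  a.1 = n ∧ pvChain parent s n a.2 ∧ (∀ x ∈ a.2, x ∈ visited) ∧ a.2.length ≤ parent.size + 1

-- visited in A is exactly {start} ∪ parent.keys in B
def pvVis (s : String) (visited : PySem.Set String) (parent : PySem.Dict String String) : Prop :=
  ∀ x, x ∈ visited ↔ (parent.contains x = true ∨ x = s)

-- A's inner scan, when some connection hits end_table, returns path ++ [end_table]
lemma pvScanA_hit (e : String) (p : List String) :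
    ∀ (conns : List (List (String × String))) (qA : List (String × List String))
      (visited : PySem.Set String),
      (conns.map (fun c => (PySem.Dict.mk c).getD "table" "")).contains e = true →
      ∃ q' v', pvScanA e p conns qA visited = (some (p ++ [e]), q', v') := by
  intro conns
  induction conns with
  | nil => intro qA visited h; simp at h
  | cons c cs ih =>
      intro qA visited h
      by_cases hc : (PySem.Dict.mk c).getD "table" "" = e
      · exact ⟨qA, visited, by simp [pvScanA, hc]⟩
      · have hcs : (cs.map (fun c => (PySem.Dict.mk c).getD "table" "")).contains e = true := by
          simp only [List.map_cons, List.contains_cons] at h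
          rcases Bool.or_eq_true_iff.mp h with h | h
          · exact absurd (eq_of_beq h).symm hc
          · exact h
        by_cases hvis : (PySem.Dict.mk c).getD "table" "" ∈ visited
        · have : pvScanA e p (c :: cs) qA visited = pvScanA e p cs qA visited := by
            simp [pvScanA, hc, hvis]
          rw [this]; exact ih qA visited hcs
        · have : pvScanA e p (c :: cs) qA visited
              = pvScanA e p cs (qA ++ [((PySem.Dict.mk c).getD "table" "",
                  p ++ [(PySem.Dict.mk c).getD "table" ""])])
                  (PySem.Set.add visited ((PySem.Dict.mk c).getD "table" "")) := by
            simp [pvScanA, hc, hvis]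
          rw [this]; exact ih _ _ hcs

-- A's inner scan with no end-hit runs in lockstep with B's pvAddTargets over the target list
lemma pvScan_nohit (s e cur : String) (p : List String) :
    ∀ (conns : List (List (String × String))) (qA : List (String × List String))
      (L back : List String) (visited : PySem.Set String) (parent : PySem.Dict String String),
      (conns.map (fun c => (PySem.Dict.mk c).getD "table" "")).contains e = false →
      pvVis s visited parent →
      List.Forall₂ (pvRel s visited parent) qA (L ++ back) →
      pvChain parent s cur p → (∀ x ∈ p, x ∈ visited) → p.length ≤ parent.size + 1 →
      ∃ qA' back' visited' parent',
        pvScanA e p conns qA visited = (none, qA', visited') ∧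
        pvAddTargets s cur (conns.map (fun c => (PySem.Dict.mk c).getD "table" "")) back parent
          = (back', parent') ∧
        pvVis s visited' parent' ∧
        List.Forall₂ (pvRel s visited' parent') qA' (L ++ back') := by
  intro conns
  induction conns with
  | nil =>
      intro qA L back visited parent _ hvis hfa _ _ _
      exact ⟨qA, back, visited, parent, rfl, rfl, hvis, hfa⟩
  | cons c cs ih =>
      intro qA L back visited parent hne hvis hfa hc hsub hlen
      obtain ⟨t, ht⟩ : ∃ t, (PySem.Dict.mk c).getD "table" "" = t := ⟨_, rfl⟩
      have hte : t ≠ e := by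
        intro h0
        simp only [List.map_cons, List.contains_cons, ht, h0] at hne
        simp at hne
      have hcs : (cs.map (fun c => (PySem.Dict.mk c).getD "table" "")).contains e = false := by
        simp only [List.map_cons, List.contains_cons] at hne
        exact (Bool.or_eq_false_iff.mp hne).2
      by_cases hmem : t ∈ visited
      · -- already visited: both sides skip this target
        have hA : pvScanA e p (c :: cs) qA visited = pvScanA e p cs qA visited := by
          simp [pvScanA, ht, hte, hmem]
        have hskip : ¬ (parent.contains t = false ∧ t ≠ s) := by
          rcases (hvis t).mp hmem with h | h
          · rintro ⟨h1, _⟩; rw [h] at h1; exact absurd h1 (by simp)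
          · rintro ⟨_, h2⟩; exact h2 h
        have hB : pvAddTargets s cur ((c :: cs).map (fun c => (PySem.Dict.mk c).getD "table" ""))
            back parent = pvAddTargets s cur (cs.map (fun c => (PySem.Dict.mk c).getD "table" ""))
            back parent := by
          simp only [List.map_cons, pvAddTargets, ht, if_neg hskip]
        rw [hA, hB]
        exact ih qA L back visited parent hcs hvis hfa hc hsub hlen
      · -- fresh target: A enqueues (t, p ++ [t]) and marks visited; B records parent and appends to back
        have hcontains : parent.contains t = false := by
          cases h0 : parent.contains t with
          | false => rfl
          | true => exact absurd ((hvis t).mpr (Or.inl h0)) hmem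
        have hts : t ≠ s := fun h0 => hmem ((hvis t).mpr (Or.inr h0))
        have hA : pvScanA e p (c :: cs) qA visited
            = pvScanA e p cs (qA ++ [(t, p ++ [t])]) (PySem.Set.add visited t) := by
          simp [pvScanA, ht, hte, hmem]
        have hB : pvAddTargets s cur ((c :: cs).map (fun c => (PySem.Dict.mk c).getD "table" ""))
            back parent = pvAddTargets s cur (cs.map (fun c => (PySem.Dict.mk c).getD "table" ""))
            (back ++ [t]) (parent.insert t cur) := by
          simp only [List.map_cons, pvAddTargets, ht]
          simp [hcontains, hts]
        rw [hA, hB]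
        have hsize : (parent.insert t cur).size = parent.size + 1 := by
          simp [PySem.Dict.size_insert, hcontains]
        have hvis' : pvVis s (PySem.Set.add visited t) (parent.insert t cur) := by
          intro x
          rw [PySem.Set.mem_add, PySem.Dict.contains_insert, hvis x]
          constructor
          · rintro (⟨h | h⟩ | h)
            · exact Or.inl (by simp [h])
            · exact Or.inr h
            · exact Or.inl (by simp [h])
          · rintro (h | h)
            · rcases Bool.or_eq_true_iff.mp h with h | h
              · exact Or.inr (by simpa using h)
              · exact Or.inl (Or.inl h)
            · exact Or.inl (Or.inr h)
        have hc' : pvChain (parent.insert t cur) s cur p := pvChain_insert_fresh hc hsub hmem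
        refine ih (qA ++ [(t, p ++ [t])]) L (back ++ [t]) (PySem.Set.add visited t)
          (parent.insert t cur) hcs hvis' ?_ hc'
          (fun x hx => (PySem.Set.mem_add visited t x).mpr (Or.inl (hsub x hx))) (by omega)
        rw [← List.append_assoc]
        refine List.rel_append ?_ ?_
        · refine List.Forall₂.imp ?_ hfa
          rintro ⟨a1, a2⟩ n ⟨h1, h2, h3, h4⟩
          exact ⟨h1, pvChain_insert_fresh h2 h3 hmem,
            fun x hx => (PySem.Set.mem_add visited t x).mpr (Or.inl (h3 x hx)), by omega⟩
        · refine List.forall₂_cons.mpr ⟨⟨rfl, ?_, ?_, ?_⟩, List.Forall₂.nil⟩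
          · exact pvChain.step t cur p hts (PySem.Dict.get?_insert_self parent t cur) hc'
          · intro x hx
            rcases List.mem_append.mp hx with hx | hx
            · exact (PySem.Set.mem_add visited t x).mpr (Or.inl (hsub x hx))
            · simp at hx
              exact (PySem.Set.mem_add visited t x).mpr (Or.inr hx)
          · simp; omega

-- main simulation: A's loop over the single queue = B's loop over the two-list queue
lemma pvLoop_sim (graph : PySem.Dict String (List (List (String × String)))) (s e : String) :
    ∀ (fuel : Nat) (qA : List (String × List String)) (front back : List String)
      (visited : PySem.Set String) (parent : PySem.Dict String String),
      pvVis s visited parent →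
      List.Forall₂ (pvRel s visited parent) qA (front.reverse ++ back) →
      pvLoopA graph e fuel qA visited = pvLoopB graph s e fuel front back parent := by
  intro fuel
  induction fuel with
  | zero => intro qA front back visited parent _ _; rfl
  | succ f ih =>
      intro qA front back visited parent hvis hfa
      cases qA with
      | nil =>
          have hnil : front.reverse ++ back = [] := List.forall₂_nil_left_iff.mp hfa
          have hfront : front = [] := by
            have := List.append_eq_nil_iff.mp hnil
            simpa using this.1
          have hback : back = [] := (List.append_eq_nil_iff.mp hnil).2
          simp [pvLoopA, pvLoopB, hfront, hback]
      | cons a rest =>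
          obtain ⟨a1, a2⟩ := a
          -- the effective pop order list is nonempty
          cases hns : front.reverse ++ back with
          | nil => rw [hns] at hfa; cases hfa
          | cons n ns =>
          rw [hns] at hfa
          cases hfa with
          | cons hhead htail =>
          obtain ⟨h1, h2, h3, h4⟩ := hhead
          simp only at h1 h2 h3 h4
          subst h1
          -- B's refill step: front' / back'
          have hne : ¬ (front.isEmpty && back.isEmpty) = true := by
            intro h0
            have h0' := Bool.and_eq_true_iff.mp h0
            rw [List.isEmpty_iff.mp h0'.1, List.isEmpty_iff.mp h0'.2] at hns
            simp at hns
          obtain ⟨front', back', hfb, hinvfb⟩ :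
              ∃ front' back', ((if front.isEmpty then back.reverse else front) = front'
                ∧ (if front.isEmpty then ([] : List String) = back' else back = back'))
                ∧ front'.reverse ++ back' = front.reverse ++ back := by
            by_cases hf : front.isEmpty
            · exact ⟨back.reverse, [], ⟨by simp [hf], by simp [hf]⟩,
                by simp [List.isEmpty_iff.mp hf]⟩
            · exact ⟨front, back, ⟨by simp [hf], by simp [hf]⟩, rfl⟩
          have hfront' : front'.reverse ++ back' = a1 :: ns := by rw [hinvfb, hns]
          have hfrne : front' ≠ [] := by
            intro h0
            rcases hfb.1.symm ▸ h0 with h0'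
            by_cases hf : front.isEmpty
            · rw [if_pos hf] at h0'
              have : back = [] := by simpa using h0'
              rw [List.isEmpty_iff.mp hf, this] at hns; simp at hns
            · rw [if_neg hf] at h0'
              exact hf (List.isEmpty_iff.mpr h0')
          have hrev : front'.reverse = a1 :: (front'.reverse.drop 1) := by
            cases h0 : front'.reverse with
            | nil => exact absurd (by simpa using h0) hfrne
            | cons x xs =>
                rw [h0] at hfront'
                simp at hfront'
                simp [hfront'.1]
          have hlast : front'.getLast? = some a1 := by
            rw [List.getLast?_eq_head?_reverse, hrev]; rfl
          have hrevstruct : front'.reverse = a1 :: front'.dropLast.reverse := by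
            conv_lhs => rw [← List.dropLast_append_getLast hfrne, List.reverse_append]
            have : front'.getLast hfrne = a1 := by
              have := List.getLast?_eq_some_getLast (l := front') hfrne
              rw [hlast] at this
              exact (Option.some_injective _ this).symm
            simp [this]
          have hdrop : front'.dropLast.reverse ++ back' = ns := by
            have := hfront'
            rw [hrevstruct] at this
            simpa using this
          -- unfold one step of B
          have hBstep : pvLoopB graph s e (f + 1) front back parent
              = (let targets := (graph.getD a1 []).map
                    (fun connection => (PySem.Dict.mk connection).getD "table" "")
                 if targets.contains e then
                   some ((pvRebuildB parent s (parent.size + 1) a1 [e] ++ [s]).reverse)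
                 else
                   match pvAddTargets s a1 targets back' parent with
                   | (back'', parent') => pvLoopB graph s e f front'.dropLast back'' parent') := by
            rw [pvLoopB, if_neg hne]
            by_cases hf : front.isEmpty
            · have e1 : (if front.isEmpty then back.reverse else front) = front' := hfb.1
              have e2 : ([] : List String) = back' := by
                have := hfb.2; rwa [if_pos hf] at this
              simp only [hf, if_true] at e1 ⊢
              rw [e1, ← e2, hlast]
            · have e1 : (if front.isEmpty then back.reverse else front) = front' := hfb.1
              have e2 : back = back' := by
                have := hfb.2; rwa [if_neg hf] at this
              simp only [hf] at e1 ⊢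
              rw [e1, e2, hlast]
              simp
          rw [hBstep]
          simp only [pvLoopA]
          by_cases hhit : (((graph.getD a1 []).map
              (fun c => (PySem.Dict.mk c).getD "table" "")).contains e) = true
          · -- end_table among a1's targets: A returns a2 ++ [e], B rebuilds the same path
            obtain ⟨q', v', hscan⟩ := pvScanA_hit e a2 (graph.getD a1 []) rest visited hhit
            rw [hscan]
            simp only [hhit, if_true]
            rw [pvRebuildB_correct h2 (parent.size + 1) [e] (by omega)]
            have hhd : a2 = s :: a2.drop 1 := by
              have := pvChain_head h2
              cases h0 : a2 with
              | nil => rw [h0] at this; simp at this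
              | cons x xs =>
                  rw [h0] at this
                  simp at this
                  simp [this]
            simp only [List.reverse_append, List.reverse_reverse, List.reverse_cons,
              List.reverse_nil, List.nil_append]
            conv_lhs => rw [hhd]
            simp [List.drop_one]
          · -- no hit: one lockstep scan, then recurse
            rw [Bool.not_eq_true] at hhit
            obtain ⟨qA', back'', visited', parent', hsA, hsB, hvis', hfa'⟩ :=
              pvScan_nohit s e a1 a2 (graph.getD a1 []) rest front'.dropLast.reverse back'
                visited parent hhit hvis (by rw [hdrop]; exact htail) h2 h3 h4
            rw [hsA]
            simp only [hhit, if_false, Bool.false_eq_true]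
            rw [hsB]
            exact ih qA' front'.dropLast back'' visited' parent' hvis' hfa'

-- ===== VERDICT (by name: the statement is the Claim_ definition above) =====
theorem find_table_path_spec : Claim_equal_find_table_path := by
  intro graph start_table end_table _ _
  show find_table_path graph start_table end_table
      = find_table_path_alt graph start_table end_table
  unfold find_table_path find_table_path_alt
  by_cases h1 : start_table = end_table
  · simp [h1]
  · by_cases h2 : (PySem.Dict.mk graph).contains start_table = false
    · simp [h1, h2]
    · simp only [if_neg h1, if_neg h2]
      apply pvLoop_sim
      · intro x
        rw [PySem.Set.mem_ofList, PySem.Dict.contains_empty]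
        constructor
        · intro hx; exact Or.inr (by simpa using hx)
        · rintro (h | h)
          · cases h
          · simp [h]
      · refine List.forall₂_cons.mpr ⟨⟨rfl, pvChain.base, ?_, ?_⟩, List.Forall₂.nil⟩
        · intro x hx
          simp at hx
          simp [hx, PySem.Set.ofList]
        · simp [PySem.Dict.empty, PySem.Dict.size]
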